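-- pv_equiv track=rewrite | github.com/detongz/materialWebSite | models/security.py | text2Html
-- ===== SOURCE A (Python) =====
-- def text2Html(content):
--     def escape(txt):
--         """将txt文本中的空格、&、<、>、（"）、（'）转化成对应的的字符实体，以方便在html上显示"""
--         txt = txt.replace('&', '&#38;')
--         txt = txt.replace(' ', '&#160;')
--         txt = txt.replace('<', '&#60;')
--         txt = txt.replace('>', '&#62;')
--         txt = txt.replace('"', '&#34;')
--         txt = txt.replace('\'', '&#39;')
--         return txt
--
--     content = escape(content)
--     lines = content.split('\n')
--     for i, line in enumerate(lines):
--         lines[i] = '<p>' + line + '</p>'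
--     content = ''.join(lines)
--     return content
-- ===== SOURCE B (Python) =====
-- _TAB = str.maketrans({'&': '&#38;', ' ': '&#160;', '<': '&#60;', '>': '&#62;',
--                       '"': '&#34;', "'": '&#39;', '\n': '</p><p>'})
--
--
-- def text2Html(content):
--     return '<p>' + content.translate(_TAB) + '</p>'
-- ===== Notes on version B (the rewrite author's own statement) =====
-- stated objective: simpler
-- what changed: Replaces the six sequential str.replace passes plus split('\n')/enumerate-wrap/join with one prebuilt str.maketrans table (including '\n' -> '</p><p>') and a single content.translate pass wrapped in '<p>'...'</p>'.
import Mathlib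
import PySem

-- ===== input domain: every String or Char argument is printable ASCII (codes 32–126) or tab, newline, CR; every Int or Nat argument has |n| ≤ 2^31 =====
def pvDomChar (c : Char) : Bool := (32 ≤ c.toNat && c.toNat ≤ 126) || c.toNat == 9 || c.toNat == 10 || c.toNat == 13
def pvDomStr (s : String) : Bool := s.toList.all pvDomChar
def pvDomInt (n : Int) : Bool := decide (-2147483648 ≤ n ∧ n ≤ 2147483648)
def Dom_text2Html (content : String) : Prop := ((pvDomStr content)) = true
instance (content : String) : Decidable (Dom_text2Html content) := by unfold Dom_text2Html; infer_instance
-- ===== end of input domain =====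

-- B replaces six sequential replace passes + split/wrap/join by one prebuilt
-- char→entity table and a single translate pass (objective: simpler/idiomatic).


-- ===== PORT A =====
-- Ported at the List Char level (PySem.Str.* are thin wrappers over PySem.Chars.*).
def text2Html (content : String) : String :=
  -- escape: six sequential replaces, in A's order
  let cs := content.toList
  let cs := PySem.Chars.replace cs ['&'] "&#38;".toList
  let cs := PySem.Chars.replace cs [' '] "&#160;".toList
  let cs := PySem.Chars.replace cs ['<'] "&#60;".toList
  let cs := PySem.Chars.replace cs ['>'] "&#62;".toList
  let cs := PySem.Chars.replace cs ['"'] "&#34;".toList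
  let cs := PySem.Chars.replace cs ['\''] "&#39;".toList
  -- lines = content.split('\n'); wrap each line; ''.join(lines)
  let lines := PySem.Chars.splitOn cs ['\n']
  let lines := lines.map (fun line => "<p>".toList ++ line ++ "</p>".toList)
  String.ofList (PySem.Chars.join [] lines)

-- ===== PORT B =====
-- the maketrans table (a char → string mapping, as an association list)
def pvTable : List (Char × List Char) :=
  [('&', "&#38;".toList), (' ', "&#160;".toList), ('<', "&#60;".toList),
   ('>', "&#62;".toList), ('"', "&#34;".toList), ('\'', "&#39;".toList),
   ('\n', "</p><p>".toList)]

-- str.translate(table): one pass, each char replaced by its table entry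
-- (itself if absent) — ported exactly as that charwise expansion.
def text2Html_alt (content : String) : String :=
  String.ofList ("<p>".toList
    ++ content.toList.flatMap (fun c => (pvTable.lookup c).getD [c])
    ++ "</p>".toList)

-- ===== PRECONDITION & SPEC =====
def Spec_text2Html (content : String) (out : String) : Prop := out = text2Html_alt content
instance (content : String) (out : String) : Decidable (Spec_text2Html content out) := by unfold Spec_text2Html; infer_instance

-- ===== CLAIM (what is proved, stated in full; the proofs are below) =====
def Claim_equal_text2Html : Prop := ∀ (content : String), Dom_text2Html content → Spec_text2Html content (text2Html content)

-- ===== LEMMAS AND PROOFS =====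

-- charwise view of a single-char replace
def pvRep (a : Char) (new : List Char) (c : Char) : List Char :=
  if c == a then new else [c]

lemma pv_replace_go_single (a : Char) (new : List Char) :
    ∀ (fuel : Nat) (l acc : List Char), l.length ≤ fuel →
      PySem.Chars.replace.go [a] new fuel l acc
        = acc.reverse ++ l.flatMap (pvRep a new) := by
  intro fuel
  induction fuel with
  | zero =>
      intro l acc h
      have : l = [] := List.eq_nil_of_length_eq_zero (Nat.le_zero.mp h)
      subst this
      simp [PySem.Chars.replace.go]
  | succ n ih =>
      intro l acc h
      cases l with
      | nil => simp [PySem.Chars.replace.go]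
      | cons c t =>
          by_cases hc : c = a
          · subst hc
            have hp : List.isPrefixOf [c] (c :: t) = true := by
              simp [List.isPrefixOf]
            simp only [PySem.Chars.replace.go, hp, if_pos]
            rw [ih _ _ (by simpa using Nat.le_of_succ_le_succ h)]
            simp [pvRep]
          · have hp : List.isPrefixOf [a] (c :: t) = false := by
              simp [List.isPrefixOf]
              exact fun hh => absurd hh.symm hc
            simp only [PySem.Chars.replace.go, hp]
            rw [if_neg (by simp)]
            rw [ih _ _ (by simpa using Nat.le_of_succ_le_succ h)]
            simp [pvRep, hc]

lemma pv_replace_single (a : Char) (new cs : List Char) :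
    PySem.Chars.replace cs [a] new = cs.flatMap (pvRep a new) := by
  unfold PySem.Chars.replace
  simp [pv_replace_go_single a new cs.length cs [] (le_refl _)]

-- join with empty separator is flatten
lemma pv_join_nil (xs : List (List Char)) :
    PySem.Chars.join [] xs = xs.flatten := by
  unfold PySem.Chars.join
  induction xs with
  | nil => simp [List.intercalate]
  | cons x t ih =>
      cases t with
      | nil => simp [List.intercalate]
      | cons y u =>
          simp [List.intercalate, List.intersperse] at ih ⊢
          simpa [List.intercalate, List.intersperse] using ih

-- charwise view of newline handling by the split/wrap/join pipeline
def pvNl (c : Char) : List Char :=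
  if c == '\n' then "</p><p>".toList else [c]

lemma pv_splitOn_go_wrap :
    ∀ (fuel : Nat) (l cur : List Char) (acc : List (List Char)), l.length ≤ fuel →
      ((PySem.Chars.splitOn.go ['\n'] fuel l cur acc).map
          (fun line => "<p>".toList ++ line ++ "</p>".toList)).flatten
        = (acc.reverse.map (fun line => "<p>".toList ++ line ++ "</p>".toList)).flatten
          ++ "<p>".toList ++ cur.reverse ++ l.flatMap pvNl ++ "</p>".toList := by
  intro fuel
  induction fuel with
  | zero =>
      intro l cur acc h
      have : l = [] := List.eq_nil_of_length_eq_zero (Nat.le_zero.mp h)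
      subst this
      simp [PySem.Chars.splitOn.go]
  | succ n ih =>
      intro l cur acc h
      cases l with
      | nil => simp [PySem.Chars.splitOn.go]
      | cons c rest =>
          by_cases hc : c = '\n'
          · subst hc
            have hp : List.isPrefixOf ['\n'] ('\n' :: rest) = true := by
              simp [List.isPrefixOf]
            simp only [PySem.Chars.splitOn.go, hp, if_pos]
            rw [ih _ _ _ (by simpa using Nat.le_of_succ_le_succ h)]
            simp [pvNl]
          · have hp : List.isPrefixOf ['\n'] (c :: rest) = false := by
              simp [List.isPrefixOf]
              exact fun hh => absurd hh.symm hc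
            simp only [PySem.Chars.splitOn.go, hp]
            rw [if_neg (by simp)]
            rw [ih _ _ _ (by simpa using Nat.le_of_succ_le_succ h)]
            simp [pvNl, hc]

lemma pv_splitOn_wrap (cs : List Char) :
    ((PySem.Chars.splitOn cs ['\n']).map
        (fun line => "<p>".toList ++ line ++ "</p>".toList)).flatten
      = "<p>".toList ++ cs.flatMap pvNl ++ "</p>".toList := by
  unfold PySem.Chars.splitOn
  simpa using pv_splitOn_go_wrap (cs.length + 1) cs [] [] (by omega)

-- pointwise: the six escape steps followed by the newline step equal B's table entry
lemma pv_pointwise (c : Char) :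
    (pvRep '&' "&#38;".toList c).flatMap (fun x =>
      (pvRep ' ' "&#160;".toList x).flatMap (fun x =>
        (pvRep '<' "&#60;".toList x).flatMap (fun x =>
          (pvRep '>' "&#62;".toList x).flatMap (fun x =>
            (pvRep '"' "&#34;".toList x).flatMap (fun x =>
              (pvRep '\'' "&#39;".toList x).flatMap pvNl)))))
      = (pvTable.lookup c).getD [c] := by
  by_cases h1 : c = '&'; · subst h1; decide
  by_cases h2 : c = ' '; · subst h2; decide
  by_cases h3 : c = '<'; · subst h3; decide
  by_cases h4 : c = '>'; · subst h4; decide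
  by_cases h5 : c = '"'; · subst h5; decide
  by_cases h6 : c = '\''; · subst h6; decide
  by_cases h7 : c = '\n'
  · subst h7; decide
  · have e1 : (c == '&') = false := by simp [h1]
    have e2 : (c == ' ') = false := by simp [h2]
    have e3 : (c == '<') = false := by simp [h3]
    have e4 : (c == '>') = false := by simp [h4]
    have e5 : (c == '"') = false := by simp [h5]
    have e6 : (c == '\'') = false := by simp [h6]
    have e7 : (c == '\n') = false := by simp [h7]
    simp [pvRep, pvNl, pvTable, List.lookup, h2, h3, h4, h5, h6, e1, e2, e3, e4, e5, e6, e7]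

-- ===== VERDICT (by name: the statement is the Claim_ definition above) =====
theorem text2Html_spec : Claim_equal_text2Html := by
  intro content _
  unfold Spec_text2Html text2Html text2Html_alt
  simp only [pv_replace_single, pv_join_nil, List.flatMap_assoc]
  rw [pv_splitOn_wrap]
  simp only [List.flatMap_assoc]
  simp only [pv_pointwise]
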